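-- pv_equiv track=rewrite | github.com/MrBinit/UniGraph | app/services/web_retrieval_service.py | _host_is_acronym_like
-- ===== SOURCE A (Python) =====
-- _ACRONYM_LIKE_HOST_BLOCKLIST = {"daad", "dfg", "dlr"}
--
-- def _domain_group_key(host: str) -> str:
--     normalized = str(host or "").strip().lower()
--     if normalized.startswith("www."):
--         normalized = normalized[4:]
--     if not normalized:
--         return ""
--     parts = [segment for segment in normalized.split(".") if segment]
--     if len(parts) <= 2:
--         return normalized
--     return ".".join(parts[-2:])
--
-- def _host_is_acronym_like(host: str) -> bool:
--     grouped = _domain_group_key(host)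
--     if not grouped:
--         return False
--     labels = [label for label in grouped.split(".") if label]
--     if not labels:
--         return False
--     root = labels[0]
--     if not root or not root.isalpha():
--         return False
--     if root in _ACRONYM_LIKE_HOST_BLOCKLIST:
--         return False
--     return 2 <= len(root) <= 6
-- ===== SOURCE B (Python) =====
-- _ACRONYM_LIKE_HOST_BLOCKLIST = {"daad", "dfg", "dlr"}
--
-- def _host_is_acronym_like(host: str) -> bool:
--     # Single backward character scan: walk the normalized host from the end,
--     # keeping the root label (second-to-last non-empty label, or the only one)
--     # and stopping as soon as two labels have been seen -- no split/join lists.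
--     normalized = str(host or "").strip().lower()
--     if normalized.startswith("www."):
--         normalized = normalized[4:]
--     root = None
--     found = 0
--     buf = []  # chars of the current label, collected in reverse order
--     for ch in reversed(normalized):
--         if found >= 2:
--             break
--         if ch == ".":
--             if buf:
--                 root = buf
--                 found += 1
--             buf = []
--         else:
--             buf.append(ch)
--     if found < 2 and buf:
--         root = buf
--     if root is None:
--         return False
--     label = "".join(reversed(root))
--     return (label.isalpha()
--             and label not in _ACRONYM_LIKE_HOST_BLOCKLIST
--             and 2 <= len(label) <= 6)
-- ===== Notes on version B (the rewrite author's own statement) =====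
-- stated objective: alternative
-- what changed: Replaces A's split-into-parts / join-last-two / re-split-and-filter list pipeline by a single backward character scan that accumulates the root label directly and stops as soon as two non-empty labels have been seen.
import Mathlib
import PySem

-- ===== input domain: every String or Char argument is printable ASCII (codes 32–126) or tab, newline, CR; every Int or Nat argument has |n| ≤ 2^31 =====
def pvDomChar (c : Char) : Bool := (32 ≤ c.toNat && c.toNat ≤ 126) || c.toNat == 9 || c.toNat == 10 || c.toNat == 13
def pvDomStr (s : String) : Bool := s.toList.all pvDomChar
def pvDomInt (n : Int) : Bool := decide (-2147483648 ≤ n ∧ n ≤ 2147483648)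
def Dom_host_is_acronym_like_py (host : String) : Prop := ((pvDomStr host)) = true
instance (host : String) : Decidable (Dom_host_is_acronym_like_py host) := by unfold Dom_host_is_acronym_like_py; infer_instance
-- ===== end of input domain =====

-- B replaces A's split / join-last-two / re-split list construction by one backward
-- character scan that keeps the root label and stops after two labels (alternative).

-- shared straight-line fragment of both Pythons:
-- `str(host or "").strip().lower()` then dropping a leading "www."
def pvNormalize (host : String) : String :=
  if PySem.Str.startswith (PySem.Str.lower (PySem.Str.strip host)) "www."
  then PySem.Str.slice (PySem.Str.lower (PySem.Str.strip host)) (some 4) none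
  else PySem.Str.lower (PySem.Str.strip host)

def acronymBlocklist : List String := ["daad", "dfg", "dlr"]

-- ===== PORT A =====
-- `[seg for seg in s.split(".") if seg]` (sep "." ≠ "", so split? is always `some`)
def pvParts (s : String) : List String :=
  ((PySem.Str.split? s ".").getD []).filter (fun seg => seg ≠ "")

def domain_group_key_py (host : String) : String :=
  if pvNormalize host = "" then ""
  else if (pvParts (pvNormalize host)).length ≤ 2 then pvNormalize host
  else PySem.Str.join "." (PySem.List.slice (pvParts (pvNormalize host)) (some (-2)) none)

def host_is_acronym_like_py (host : String) : Bool :=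
  if domain_group_key_py host = "" then false
  else
    match pvParts (domain_group_key_py host) with
    | [] => false
    | root :: _ =>
      if root = "" || !PySem.Str.strIsalpha root then false
      else if acronymBlocklist.contains root then false
      else decide (2 ≤ PySem.Str.len root ∧ PySem.Str.len root ≤ 6)

-- ===== PORT B =====
-- Source B's `for ch in reversed(normalized)` loop: state (root, found, buf); the
-- `break` when found ≥ 2 is the early return in the cons case.  `buf` collects
-- the current label's chars in reverse order (`buf.append(ch)` = `buf ++ [c]`),
-- and `"".join(reversed(root))` is `String.ofList rootL.reverse`.
def pvScan : List Char → Option (List Char) → Nat → List Char →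
    Option (List Char) × Nat × List Char
  | [], root, found, buf => (root, found, buf)
  | c :: rest, root, found, buf =>
    if 2 ≤ found then (root, found, buf)
    else if c = '.' then
      if buf ≠ [] then pvScan rest (some buf) (found + 1) []
      else pvScan rest root found []
    else pvScan rest root found (buf ++ [c])

def host_is_acronym_like_py_alt (host : String) : Bool :=
  let st := pvScan (pvNormalize host).toList.reverse none 0 []
  -- `if found < 2 and buf: root = buf` then `if root is None: return False`
  match (if st.2.1 < 2 ∧ st.2.2 ≠ [] then some st.2.2 else st.1) with
  | none => false
  | some rootL =>
    let label := String.ofList rootL.reverse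
    PySem.Str.strIsalpha label && !acronymBlocklist.contains label
      && decide (2 ≤ PySem.Str.len label) && decide (PySem.Str.len label ≤ 6)

-- ===== PRECONDITION & SPEC =====
def Spec_host_is_acronym_like_py (host : String) (out : Bool) : Prop := out = host_is_acronym_like_py_alt host
instance (host : String) (out : Bool) : Decidable (Spec_host_is_acronym_like_py host out) := by unfold Spec_host_is_acronym_like_py; infer_instance

-- ===== CLAIM (what is proved, stated in full; the proofs are below) =====
def Claim_equal_host_is_acronym_like_py : Prop := ∀ (host : String), Dom_host_is_acronym_like_py host → Spec_host_is_acronym_like_py host (host_is_acronym_like_py host)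

-- ===== LEMMAS AND PROOFS =====

-- proof-side variant of the scan with the current label built by cons (so the
-- label is already in forward order); bridged to pvScan below
def pvScanC : List Char → Option (List Char) → Nat → List Char →
    Option (List Char) × Nat × List Char
  | [], root, found, cur => (root, found, cur)
  | c :: rest, root, found, cur =>
    if 2 ≤ found then (root, found, cur)
    else if c = '.' then
      if cur ≠ [] then pvScanC rest (some cur) (found + 1) []
      else pvScanC rest root found []
    else pvScanC rest root found (c :: cur)


-- the common boolean tail applied to a nonempty root label
def boolTail (root : String) : Bool :=
  PySem.Str.strIsalpha root && !acronymBlocklist.contains root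
    && decide (2 ≤ PySem.Str.len root) && decide (PySem.Str.len root ≤ 6)

-- the common intermediate form both ports are reduced to
def rootForm (n : String) : Bool :=
  match PySem.List.pyGet? (pvParts n) (if (pvParts n).length ≤ 2 then 0 else -2) with
  | none => false
  | some root => boolTail root

-- ---------- generic facts about splitting on '.' ----------

-- splitOn.go never meets the separator: everything goes into `cur`
lemma go_no_dot (l : List Char) (fuel : Nat) (cur : List Char) (acc : List (List Char))
    (hl : ('.' : Char) ∉ l) (hf : l.length < fuel) :
    PySem.Chars.splitOn.go ['.'] fuel l cur acc = ((cur.reverse ++ l) :: acc).reverse := by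
  induction l generalizing fuel cur with
  | nil =>
    cases fuel with
    | zero => omega
    | succ f => simp [PySem.Chars.splitOn.go]
  | cons c rest ih =>
    cases fuel with
    | zero => omega
    | succ f =>
      have hc : ('.' : Char) ≠ c := by simp at hl; tauto
      have hrest : ('.' : Char) ∉ rest := by simp at hl; tauto
      rw [PySem.Chars.splitOn.go]
      have hnp : List.isPrefixOf ['.'] (c :: rest) = false := by
        simp [List.isPrefixOf]; exact hc
      simp only [hnp, Bool.false_eq_true, if_false]
      rw [ih f (c :: cur) hrest (by simpa using Nat.lt_of_succ_lt_succ hf)]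
      simp

lemma splitOn_pair (p q : List Char) (hp : ('.' : Char) ∉ p) (hq : ('.' : Char) ∉ q) :
    PySem.Chars.splitOn (p ++ '.' :: q) ['.'] = [p, q] := by
  unfold PySem.Chars.splitOn
  suffices h : ∀ (p : List Char) (fuel : Nat) (cur : List Char) (acc : List (List Char)),
      ('.' : Char) ∉ p → (p ++ '.' :: q).length < fuel →
      PySem.Chars.splitOn.go ['.'] fuel (p ++ '.' :: q) cur acc
        = (q :: (cur.reverse ++ p) :: acc).reverse by
    rw [h p _ [] [] hp (by omega)]; simp
  intro p
  induction p with
  | nil =>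
    intro fuel cur acc _ hf
    cases fuel with
    | zero => exact absurd hf (by omega)
    | succ f =>
      simp only [List.nil_append] at hf ⊢
      rw [PySem.Chars.splitOn.go]
      have hpre : List.isPrefixOf ['.'] ('.' :: q) = true := by simp [List.isPrefixOf]
      simp only [hpre, if_true]
      rw [show List.drop (['.'] : List Char).length ('.' :: q) = q from rfl]
      rw [go_no_dot q f [] (cur.reverse :: acc) hq (by simp at hf; omega)]
      simp
  | cons c p' ih =>
    intro fuel cur acc hcp hf
    cases fuel with
    | zero => exact absurd hf (by omega)
    | succ f =>
      have hc : ('.' : Char) ≠ c := by simp at hcp; tauto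
      rw [List.cons_append, PySem.Chars.splitOn.go]
      have hnp : List.isPrefixOf ['.'] (c :: (p' ++ '.' :: q)) = false := by
        simp [List.isPrefixOf]; exact hc
      simp only [hnp, Bool.false_eq_true, if_false]
      rw [ih f (c :: cur) acc (by simp at hcp; tauto) (by simp at hf ⊢; omega)]
      simp

-- every piece produced by splitOn on "." is dot-free
lemma splitOn_no_dot (s x : List Char) (hx : x ∈ PySem.Chars.splitOn s ['.']) :
    ('.' : Char) ∉ x := by
  unfold PySem.Chars.splitOn at hx
  suffices h : ∀ (fuel : Nat) (l cur : List Char) (acc : List (List Char)),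
      l.length < fuel → ('.' : Char) ∉ cur → (∀ y ∈ acc, ('.' : Char) ∉ y) →
      ∀ y ∈ PySem.Chars.splitOn.go ['.'] fuel l cur acc, ('.' : Char) ∉ y by
    exact h (s.length + 1) s [] [] (by omega) (by simp) (by simp) x hx
  intro fuel
  induction fuel with
  | zero => intro l cur acc hf; omega
  | succ f ih =>
    intro l cur acc hf hcur hacc y hy
    cases l with
    | nil =>
      simp [PySem.Chars.splitOn.go] at hy
      rcases hy with h | h
      · exact hacc y h
      · subst h; simpa using hcur
    | cons c rest =>
      rw [PySem.Chars.splitOn.go] at hy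
      by_cases hpre : List.isPrefixOf ['.'] (c :: rest) = true
      · simp only [hpre, if_true] at hy
        refine ih _ _ _ (by simp at hf ⊢; omega) (by simp) ?_ y hy
        intro z hz
        simp only [List.mem_cons] at hz
        rcases hz with h | h
        · subst h; simpa using hcur
        · exact hacc z h
      · simp only [hpre] at hy
        have hcne : c ≠ '.' := by
          intro h; subst h; simp [List.isPrefixOf] at hpre
        refine ih _ _ _ (by simp at hf ⊢; omega) ?_ hacc y hy
        simp only [List.mem_cons, not_or]
        exact ⟨fun h => hcne h.symm, hcur⟩

lemma slice_last_two {α : Type} (front : List α) (a b : α) :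
    PySem.List.slice (front ++ [a, b]) (some (-2)) none = [a, b] := by
  have hn : (front ++ [a, b]).length = front.length + 2 := by simp
  simp only [PySem.List.slice, PySem.List.clampIdx, hn]
  rw [if_pos (by norm_num : (-2 : Int) < 0)]
  rw [if_neg (by omega : ¬(((front.length + 2 : Nat) : Int) + (-2) < 0))]
  rw [show (((front.length + 2 : Nat) : Int) + (-2)).toNat = front.length by omega]
  rw [show front.length + 2 - front.length = 2 by omega]
  rw [List.drop_left]
  rfl

lemma pyGet_neg2 {α : Type} (front : List α) (a b : α) :
    PySem.List.pyGet? (front ++ [a, b]) (-2 : Int) = some a := by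
  have hl : (front ++ [a, b]).length = front.length + 2 := by simp
  simp only [PySem.List.pyGet?, PySem.List.pyIdx?, hl]
  rw [if_neg (by omega : ¬(0 : Int) ≤ -2),
      if_pos (by push_cast; omega : -((front.length + 2 : Nat) : Int) ≤ -2)]
  simp only [Option.bind_some]
  rw [show front.length + 2 - (-(-2 : Int)).toNat = front.length by omega]
  rw [List.getElem?_append_right (by omega)]
  simp

lemma pyGet_map {α β : Type} (l : List α) (i : Int) (f : α → β) :
    PySem.List.pyGet? (l.map f) i = (PySem.List.pyGet? l i).map f := by
  simp only [PySem.List.pyGet?, PySem.List.pyIdx?, List.length_map]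
  split <;> [skip; split] <;> simp

-- the bool tail: A's if-chain equals the shared boolTail once root ≠ ""
lemma tail_eq (root : String) (hr : root ≠ "") :
    (if (decide (root = "") || !PySem.Str.strIsalpha root) = true then false
     else if acronymBlocklist.contains root = true then false
     else decide (2 ≤ PySem.Str.len root ∧ PySem.Str.len root ≤ 6))
    = boolTail root := by
  unfold boolTail
  rw [decide_eq_false hr, Bool.false_or]
  cases hI : PySem.Str.strIsalpha root
  · simp
  · cases hC : acronymBlocklist.contains root
    · simp only [Bool.not_false, Bool.not_true, Bool.false_eq_true, if_false, Bool.true_and]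
      simp
    · simp

-- ---------- facts about pvParts (the A side) ----------

-- members of pvParts are nonempty and dot-free
lemma pvParts_mem (n : String) : ∀ x ∈ pvParts n, x ≠ "" ∧ ('.' : Char) ∉ x.toList := by
  intro x hx
  unfold pvParts at hx
  simp only [List.mem_filter, decide_eq_true_eq] at hx
  obtain ⟨hx1, hx2⟩ := hx
  refine ⟨hx2, ?_⟩
  simp only [PySem.Str.split?, PySem.Chars.split?] at hx1
  simp at hx1
  obtain ⟨y, hy, hxy⟩ := hx1
  subst hxy
  simpa using splitOn_no_dot n.toList y hy

lemma pvParts_empty : pvParts "" = [] := by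
  have h1 : PySem.Chars.splitOn ([] : List Char) ['.'] = [[]] := by
    unfold PySem.Chars.splitOn
    rw [go_no_dot _ _ _ _ (by simp) (by simp)]
    rfl
  unfold pvParts
  have h2 : ("" : String).toList = [] := rfl
  simp [PySem.Str.split?, PySem.Chars.split?, h2, h1]

-- re-splitting A's "last two labels" dotted string gives back exactly those two labels
lemma pvParts_join (a b : String) (ha : a ≠ "") (hpa : ('.' : Char) ∉ a.toList)
    (hb : b ≠ "") (hpb : ('.' : Char) ∉ b.toList) :
    pvParts (PySem.Str.join "." [a, b]) = [a, b] := by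
  have hjoin : (PySem.Str.join "." [a, b]).toList = a.toList ++ '.' :: b.toList := by
    simp [PySem.Str.join, PySem.Chars.join, List.intercalate]
  unfold pvParts
  simp only [PySem.Str.split?, PySem.Chars.split?]
  rw [show ("." : String).toList = ['.'] from rfl]
  rw [hjoin, splitOn_pair a.toList b.toList hpa hpb]
  simp [ha, hb]

lemma join_ne_empty (a b : String) : PySem.Str.join "." [a, b] ≠ "" := by
  intro h
  have hjoin : (PySem.Str.join "." [a, b]).toList = a.toList ++ '.' :: b.toList := by
    simp [PySem.Str.join, PySem.Chars.join, List.intercalate]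
  have h' := congrArg String.toList h
  rw [hjoin] at h'
  simp at h'

-- A reduces to rootForm
lemma A_aux (host : String) :
    host_is_acronym_like_py host = rootForm (pvNormalize host) := by
  unfold host_is_acronym_like_py rootForm domain_group_key_py
  generalize pvNormalize host = n
  by_cases h0 : n = ""
  · subst h0
    rw [if_pos rfl, if_pos rfl, pvParts_empty]
    rfl
  · rw [if_neg h0]
    by_cases hlen : (pvParts n).length ≤ 2
    · rw [if_pos hlen, if_neg h0]
      cases hp : pvParts n with
      | nil => rfl
      | cons root rest =>
        have hroot : root ≠ "" := (pvParts_mem n root (hp ▸ List.mem_cons_self)).1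
        have hget : PySem.List.pyGet? (root :: rest) (0 : Int) = some root := by
          simp [PySem.List.pyGet?, PySem.List.pyIdx?]
        rw [hp] at hlen
        rw [if_pos hlen, hget]
        exact tail_eq root hroot
    · rw [if_neg hlen]
      obtain ⟨front, a, b, hfab⟩ : ∃ front a b, pvParts n = front ++ [a, b] := by
        have h2 : ((pvParts n).drop ((pvParts n).length - 2)).length = 2 := by
          simp only [List.length_drop]; omega
        rcases hd : (pvParts n).drop ((pvParts n).length - 2) with _ | ⟨a, _ | ⟨b, _ | _⟩⟩ <;>
          rw [hd] at h2 <;> try simp at h2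
        exact ⟨(pvParts n).take ((pvParts n).length - 2), a, b,
          by conv_lhs => rw [← List.take_append_drop ((pvParts n).length - 2) (pvParts n), hd]⟩
      have ha := pvParts_mem n a (hfab ▸ (by simp : a ∈ front ++ [a, b]))
      have hb := pvParts_mem n b (hfab ▸ (by simp : b ∈ front ++ [a, b]))
      rw [hfab, slice_last_two]
      rw [if_neg (join_ne_empty a b)]
      rw [pvParts_join a b ha.1 ha.2 hb.1 hb.2]
      have hlen2 : ¬((front ++ [a, b]).length ≤ 2) := hfab ▸ hlen
      rw [if_neg hlen2, pyGet_neg2]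
      exact tail_eq a ha.1

-- ---------- the B side: characterizing the backward scan ----------

-- the leading dot-free run of a (forward) char list
def leadRun : List Char → List Char
  | [] => []
  | c :: r => if c = '.' then [] else c :: leadRun r

-- the nonempty dot-separated labels strictly after the leading run
def pTail : List Char → List (List Char)
  | [] => []
  | c :: r => if c = '.' then (if leadRun r ≠ [] then leadRun r :: pTail r else pTail r)
              else pTail r

-- all nonempty labels, in order
def pFull (l : List Char) : List (List Char) :=
  if leadRun l ≠ [] then leadRun l :: pTail l else pTail l

-- closed recursion computing splitOn l ['.']
def resSplit : List Char → List Char → List (List Char)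
  | [], cur => [cur.reverse]
  | c :: r, cur => if c = '.' then cur.reverse :: resSplit r [] else resSplit r (c :: cur)

lemma go_eq_res (l : List Char) (fuel : Nat) (cur : List Char) (acc : List (List Char))
    (hf : l.length < fuel) :
    PySem.Chars.splitOn.go ['.'] fuel l cur acc = acc.reverse ++ resSplit l cur := by
  induction l generalizing fuel cur acc with
  | nil =>
    cases fuel with
    | zero => omega
    | succ f => simp [PySem.Chars.splitOn.go, resSplit]
  | cons c rest ih =>
    cases fuel with
    | zero => omega
    | succ f =>
      rw [PySem.Chars.splitOn.go]
      by_cases hc : c = '.'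
      · subst hc
        have hpre : List.isPrefixOf ['.'] ('.' :: rest) = true := by simp [List.isPrefixOf]
        simp only [hpre, if_true]
        rw [show List.drop (['.'] : List Char).length ('.' :: rest) = rest from rfl]
        rw [ih f [] (cur.reverse :: acc) (by simp at hf ⊢; omega)]
        simp [resSplit]
      · have hpre : List.isPrefixOf ['.'] (c :: rest) = false := by
          simp [List.isPrefixOf]; exact fun h => hc h.symm
        simp only [hpre, Bool.false_eq_true, if_false]
        rw [ih f (c :: cur) acc (by simp at hf ⊢; omega)]
        simp [resSplit, hc]

lemma splitOn_eq_res (l : List Char) :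
    PySem.Chars.splitOn l ['.'] = resSplit l [] := by
  unfold PySem.Chars.splitOn
  rw [go_eq_res l _ [] [] (by omega)]
  rfl

lemma res_shape (l : List Char) : ∀ cur, ∃ t, resSplit l cur = (cur.reverse ++ leadRun l) :: t
    ∧ t.filter (fun x => !decide (x = [])) = pTail l := by
  induction l with
  | nil => intro cur; exact ⟨[], by simp [resSplit, leadRun], by simp [pTail]⟩
  | cons c r ih =>
    intro cur
    by_cases hc : c = '.'
    · subst hc
      obtain ⟨t, ht, hft⟩ := ih []
      refine ⟨resSplit r [], by simp [resSplit, leadRun], ?_⟩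
      rw [ht, List.filter_cons]
      by_cases hl : leadRun r = []
      · simp [pTail, hl, hft]
      · simp [pTail, hl, hft]
    · obtain ⟨t, ht, hft⟩ := ih (c :: cur)
      refine ⟨t, ?_, ?_⟩
      · rw [resSplit, if_neg hc, ht]; simp [leadRun, hc]
      · rw [hft]; simp [pTail, hc]

lemma filter_res (l : List Char) :
    (resSplit l []).filter (fun x => !decide (x = [])) = pFull l := by
  obtain ⟨t, ht, hft⟩ := res_shape l []
  rw [ht, List.filter_cons]
  simp only [List.reverse_nil, List.nil_append, pFull]
  by_cases hl : leadRun l = []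
  · simp [hl, hft]
  · simp [hl, hft]

-- pvParts is pFull on the character level
lemma pvParts_eq_pFull (n : String) :
    pvParts n = (pFull n.toList).map String.ofList := by
  unfold pvParts
  have hs : PySem.Str.split? n "." =
      some ((PySem.Chars.splitOn n.toList ['.']).map String.ofList) := by
    simp [PySem.Str.split?, PySem.Chars.split?]
  rw [hs]
  simp only [Option.getD_some]
  rw [splitOn_eq_res, ← filter_res, List.filter_map]
  congr 1
  exact List.filter_congr (fun x _ => by simp [Function.comp])

-- the scan ignores its input once found ≥ 2
lemma pvScanC_frozen (l : List Char) (root : Option (List Char)) (found : Nat)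
    (cur : List Char) (h : 2 ≤ found) : pvScanC l root found cur = (root, found, cur) := by
  cases l with
  | nil => rfl
  | cons c rest => rw [pvScanC, if_pos h]

lemma pvScanC_append (xs ys : List Char) (root : Option (List Char)) (found : Nat)
    (cur : List Char) :
    pvScanC (xs ++ ys) root found cur =
      pvScanC ys (pvScanC xs root found cur).1 (pvScanC xs root found cur).2.1
        (pvScanC xs root found cur).2.2 := by
  induction xs generalizing root found cur with
  | nil => simp [pvScanC]
  | cons c rest ih =>
    rw [List.cons_append, pvScanC]
    conv_rhs => rw [pvScanC]
    by_cases h2 : 2 ≤ found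
    · rw [if_pos h2, if_pos h2]
      exact (pvScanC_frozen ys root found cur h2).symm
    · rw [if_neg h2, if_neg h2]
      split_ifs with hc hcur
      · exact ih _ _ _
      · exact ih _ _ _
      · exact ih _ _ _

-- scanning the reversed string: the state is determined by pTail / leadRun
lemma pvScanC_rev (s : List Char) :
    ((pTail s).reverse = [] ∧ pvScanC s.reverse none 0 [] = (none, 0, leadRun s)) ∨
    (∃ a, (pTail s).reverse = [a] ∧ pvScanC s.reverse none 0 [] = (some a, 1, leadRun s)) ∨
    (∃ a b t c, (pTail s).reverse = a :: b :: t ∧ pvScanC s.reverse none 0 [] = (some b, 2, c)) := by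
  induction s with
  | nil => exact Or.inl ⟨rfl, rfl⟩
  | cons ch r ih =>
    rw [show (ch :: r).reverse = r.reverse ++ [ch] by simp, pvScanC_append]
    by_cases hc : ch = '.'
    · subst hc
      rcases ih with ⟨h1, h2⟩ | ⟨a, h1, h2⟩ | ⟨a, b, t, c, h1, h2⟩
      · rw [h2]
        have hpt : pTail r = [] := by simpa using h1
        by_cases hl : leadRun r = []
        · refine Or.inl ⟨by simp [pTail, hl, hpt], by simp [pvScanC, hl, leadRun]⟩
        · refine Or.inr (Or.inl ⟨leadRun r, by simp [pTail, hl, hpt], by simp [pvScanC, hl, leadRun]⟩)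
      · rw [h2]
        have hpt : pTail r = [a] := by
          have := congrArg List.reverse h1; simpa using this
        by_cases hl : leadRun r = []
        · refine Or.inr (Or.inl ⟨a, by simp [pTail, hl, hpt], by simp [pvScanC, hl, leadRun]⟩)
        · refine Or.inr (Or.inr ⟨a, leadRun r, [], [], by simp [pTail, hl, hpt],
            by simp [pvScanC, hl]⟩)
      · rw [h2, pvScanC_frozen _ _ _ _ (by simp)]
        refine Or.inr (Or.inr ?_)
        by_cases hl : leadRun r = []
        · exact ⟨a, b, t, c, by simp [pTail, hl, h1], rfl⟩
        · exact ⟨a, b, t ++ [leadRun r], c, by simp [pTail, hl, h1], rfl⟩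
    · rcases ih with ⟨h1, h2⟩ | ⟨a, h1, h2⟩ | ⟨a, b, t, c, h1, h2⟩
      · rw [h2]
        exact Or.inl ⟨by simp [pTail, hc, h1], by simp [pvScanC, hc, leadRun]⟩
      · rw [h2]
        exact Or.inr (Or.inl ⟨a, by simp [pTail, hc, h1], by simp [pvScanC, hc, leadRun]⟩)
      · rw [h2, pvScanC_frozen _ _ _ _ (by simp)]
        exact Or.inr (Or.inr ⟨a, b, t, c, by simp [pTail, hc, h1], rfl⟩)

-- the scan's root equals A's indexed root, on the character level
lemma scan_root (s : List Char) :
    (if (pvScanC s.reverse none 0 []).2.1 < 2 ∧ (pvScanC s.reverse none 0 []).2.2 ≠ []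
     then some (pvScanC s.reverse none 0 []).2.2 else (pvScanC s.reverse none 0 []).1)
    = PySem.List.pyGet? (pFull s) (if (pFull s).length ≤ 2 then 0 else -2) := by
  have hget0 : ∀ (x : List Char) (xs : List (List Char)),
      PySem.List.pyGet? (x :: xs) (0 : Int) = some x := by
    intro x xs; simp [PySem.List.pyGet?, PySem.List.pyIdx?]
  rcases pvScanC_rev s with ⟨h1, h2⟩ | ⟨a, h1, h2⟩ | ⟨a, b, t, c, h1, h2⟩
  · have hpt : pTail s = [] := by simpa using h1
    rw [h2]
    by_cases hl : leadRun s = []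
    · simp [pFull, hl, hpt, PySem.List.pyGet?, PySem.List.pyIdx?]
    · simp only [pFull, hpt, if_pos hl, ne_eq]
      rw [if_pos ⟨by norm_num, hl⟩, if_pos (by simp), hget0]
  · have hpt : pTail s = [a] := by
      have := congrArg List.reverse h1; simpa using this
    rw [h2]
    by_cases hl : leadRun s = []
    · rw [if_neg (by simp [hl])]
      simp only [pFull, hpt, hl, ne_eq, not_true_eq_false, if_false]
      rw [if_pos (by simp), hget0]
    · rw [if_pos ⟨by norm_num, hl⟩]
      simp only [pFull, if_pos hl, hpt]
      rw [if_pos (by simp), hget0]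
  · have hpt : pTail s = t.reverse ++ [b, a] := by
      have := congrArg List.reverse h1; simpa using this
    rw [h2]
    rw [if_neg (by simp)]
    by_cases hl : leadRun s = []
    · simp only [pFull, hpt, hl, ne_eq, not_true_eq_false, if_false]
      cases ht : t.reverse with
      | nil =>
        simp only [List.nil_append]
        rw [if_pos (by simp), hget0]
      | cons x xs =>
        rw [if_neg (by simp only [List.length_append, List.length_cons]; omega)]
        rw [show x :: xs ++ [b, a] = (x :: xs) ++ [b, a] from rfl, pyGet_neg2]
    · simp only [pFull, if_pos hl, hpt]
      rw [if_neg (by simp only [List.length_cons, List.length_append, List.length_reverse]; omega)]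
      rw [show leadRun s :: (t.reverse ++ [b, a]) = (leadRun s :: t.reverse) ++ [b, a] from rfl,
        pyGet_neg2]

-- the port's append-built buffer is the cons-built label, reversed
lemma pvScan_eq_scanC (l : List Char) (root : Option (List Char)) (found : Nat)
    (cur : List Char) :
    pvScan l (Option.map List.reverse root) found cur.reverse
      = ((pvScanC l root found cur).1.map List.reverse,
         (pvScanC l root found cur).2.1, (pvScanC l root found cur).2.2.reverse) := by
  induction l generalizing root found cur with
  | nil => rfl
  | cons c rest ih =>
    rw [pvScan, pvScanC]
    by_cases h2 : 2 ≤ found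
    · rw [if_pos h2, if_pos h2]
    · rw [if_neg h2, if_neg h2]
      by_cases hc : c = '.'
      · rw [if_pos hc, if_pos hc]
        by_cases hcur : cur = []
        · subst hcur
          simp only [List.reverse_nil, ne_eq, not_true_eq_false, if_false]
          exact ih root found []
        · rw [if_pos (by simp [hcur]), if_pos hcur]
          have := ih (some cur) (found + 1) []
          simpa using this
      · rw [if_neg hc, if_neg hc]
        have := ih root found (c :: cur)
        simpa using this

-- B reduces to rootForm
lemma B_aux (host : String) :
    host_is_acronym_like_py_alt host = rootForm (pvNormalize host) := by
  unfold host_is_acronym_like_py_alt rootForm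
  rw [pvParts_eq_pFull]
  simp only [List.length_map, pyGet_map]
  rw [← scan_root]
  have hb := pvScan_eq_scanC (pvNormalize host).toList.reverse none 0 []
  simp only [Option.map_none, List.reverse_nil] at hb
  rw [hb]
  obtain ⟨r0, f0, c0⟩ := pvScanC (pvNormalize host).toList.reverse none 0 []
  simp only
  by_cases h : f0 < 2 ∧ c0 ≠ []
  · rw [if_pos (by simpa using h), if_pos h]
    simp [boolTail]
  · rw [if_neg (by simpa using h), if_neg h]
    cases r0 with
    | none => rfl
    | some x => simp [boolTail]

-- ===== VERDICT (by name: the statement is the Claim_ definition above) =====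
theorem host_is_acronym_like_py_spec : Claim_equal_host_is_acronym_like_py := by
  intro host _
  unfold Spec_host_is_acronym_like_py
  rw [A_aux, B_aux]
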